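-- pv_equiv track=rewrite | github.com/abclzr/vqe_tetris | core/synthesis_FT.py | max_chain
-- ===== SOURCE A (Python) =====
-- def max_chain(pt): # pt is ordered cx sequence
--     pc = [[pt[0]]]
--     for i in pt:
--         fl = False
--         for j in pc:
--             if i[0] == j[-1][0] or i[0] == j[-1][1] or i[1] == j[-1][0] or i[1] == j[-1][1]:
--                 j.append(i)
--                 fl = True
--         if fl == False:
--             pc.append([i])
--     return pc
-- ===== SOURCE B (Python) =====
-- def max_chain(pt):
--     # Index chains by the qubits of their last gate: look up matching chains instead of scanning all chains.
--     chains = [[pt[0]]]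
--     buckets = {}  # qubit -> set of indices of chains whose last gate touches it
--     buckets.setdefault(pt[0][0], set()).add(0)
--     buckets.setdefault(pt[0][1], set()).add(0)
--     for i in pt:
--         a, b = i[0], i[1]
--         hits = sorted(buckets.get(a, set()) | buckets.get(b, set()))
--         if hits:
--             for c in hits:
--                 x, y = chains[c][-1][0], chains[c][-1][1]
--                 buckets[x].discard(c)
--                 buckets[y].discard(c)
--                 chains[c].append(i)
--                 buckets.setdefault(a, set()).add(c)
--                 buckets.setdefault(b, set()).add(c)
--         else:
--             c = len(chains)
--             chains.append([i])
--             buckets.setdefault(a, set()).add(c)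
--             buckets.setdefault(b, set()).add(c)
--     return chains
-- ===== Notes on version B (the rewrite author's own statement) =====
-- stated objective: alternative
-- what changed: Instead of scanning every existing chain for each gate, B maintains a dict from qubit to the set of chains whose last gate touches that qubit, so the matching chains are found by two dict lookups plus a sort of the hit set rather than a scan over all chains.
-- outside the precondition, e.g. on max_chain([(0,), (0, 8)]): A returns [[(0,), (0,), (0, 8)]], B raises IndexError
import Mathlib
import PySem

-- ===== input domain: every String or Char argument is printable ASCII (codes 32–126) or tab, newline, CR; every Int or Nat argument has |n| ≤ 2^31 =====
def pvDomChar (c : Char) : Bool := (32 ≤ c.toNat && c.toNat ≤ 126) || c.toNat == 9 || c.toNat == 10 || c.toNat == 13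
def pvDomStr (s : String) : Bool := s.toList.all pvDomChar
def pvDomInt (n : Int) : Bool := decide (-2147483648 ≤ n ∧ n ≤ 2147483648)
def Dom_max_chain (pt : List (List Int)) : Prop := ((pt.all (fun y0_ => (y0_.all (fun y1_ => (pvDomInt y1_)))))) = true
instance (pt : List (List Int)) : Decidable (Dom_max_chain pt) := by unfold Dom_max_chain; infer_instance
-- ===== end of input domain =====

-- B replaces A's per-gate scan over all chains by a dict indexing chains by the qubits of
-- their last gate (objective: alternative algorithm, same return value).

-- ===== PORT A =====
-- the inner 'if' condition of A: i[0] == j[-1][0] or i[0] == j[-1][1] or i[1] == j[-1][0] or i[1] == j[-1][1]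
def pvCondA (i : List Int) (j : List (List Int)) : Bool :=
  let last := PySem.List.pyGetD j (-1) ([] : List Int)
  (PySem.List.pyGetD i 0 0 == PySem.List.pyGetD last 0 0) ||
  (PySem.List.pyGetD i 0 0 == PySem.List.pyGetD last 1 0) ||
  (PySem.List.pyGetD i 1 0 == PySem.List.pyGetD last 0 0) ||
  (PySem.List.pyGetD i 1 0 == PySem.List.pyGetD last 1 0)

def max_chain (pt : List (List Int)) : List (List (List Int)) :=
  -- pc = [[pt[0]]]
  let pc0 : List (List (List Int)) := [[PySem.List.pyGetD pt 0 ([] : List Int)]]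
  pt.foldl (fun pc i =>
    -- fl = False; for j in pc: if <cond>: j.append(i); fl = True
    let r := pc.foldl
      (fun (st : List (List (List Int)) × Bool) j =>
        if pvCondA i j then (st.1 ++ [j ++ [i]], true) else (st.1 ++ [j], st.2))
      ([], false)
    -- if fl == False: pc.append([i])
    if r.2 then r.1 else r.1 ++ [[i]]) pc0

-- ===== PORT B =====
-- buckets.setdefault(q, set()).add(c)  — mutates the set stored at q (inserted empty if absent)
def pvBAdd (bk : PySem.Dict Int (PySem.Set Int)) (q c : Int) : PySem.Dict Int (PySem.Set Int) :=
  bk.modify q [] (fun s => PySem.Set.add s c)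

-- buckets[q].discard(c) — under the loop invariant q is always a present key (proved below),
-- so modify-with-default-[] is exact here
def pvBDiscard (bk : PySem.Dict Int (PySem.Set Int)) (q c : Int) : PySem.Dict Int (PySem.Set Int) :=
  bk.modify q [] (fun s => PySem.Set.discard s c)

def max_chain_alt (pt : List (List Int)) : List (List (List Int)) :=
  let first := PySem.List.pyGetD pt 0 ([] : List Int)
  let st0 : (List (List (List Int))) × PySem.Dict Int (PySem.Set Int) :=
    ([[first]],
      pvBAdd (pvBAdd PySem.Dict.empty (PySem.List.pyGetD first 0 0) 0) (PySem.List.pyGetD first 1 0) 0)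
  (pt.foldl (fun st i =>
    let a := PySem.List.pyGetD i 0 0
    let b := PySem.List.pyGetD i 1 0
    let hits := PySem.List.sorted
      (PySem.Set.union (st.2.getD a []) (st.2.getD b [])) (fun c => c) false
    if hits ≠ [] then
      hits.foldl (fun st c =>
        let lastc := PySem.List.pyGetD (PySem.List.pyGetD st.1 c ([] : List (List Int))) (-1) ([] : List Int)
        let x := PySem.List.pyGetD lastc 0 0
        let y := PySem.List.pyGetD lastc 1 0
        let bk := pvBDiscard (pvBDiscard st.2 x c) y c
        (PySem.List.pySetD st.1 c (PySem.List.pyGetD st.1 c ([] : List (List Int)) ++ [i]),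
         pvBAdd (pvBAdd bk a c) b c)) st
    else
      (st.1 ++ [[i]],
       pvBAdd (pvBAdd st.2 a (st.1.length : Int)) b (st.1.length : Int))) st0).1

-- ===== PRECONDITION & SPEC =====
-- Pre_ excludes the empty list and inputs containing a gate with fewer than two entries:
-- there Python A raises IndexError, except when 'or'-short-circuiting lets A return a value
-- without ever reading the missing second entry; B always reads both entries of a gate, so
-- B raises IndexError on all such inputs.
def Pre_max_chain (pt : List (List Int)) : Prop :=
  pt ≠ [] ∧ ∀ l ∈ pt, 2 ≤ l.length
instance (pt : List (List Int)) : Decidable (Pre_max_chain pt) := by unfold Pre_max_chain; infer_instance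

def pvWitness_max_chain : List (List Int) := [[0, 1], [1, 2], [3, 4]]

def Spec_max_chain (pt : List (List Int)) (out : List (List (List Int))) : Prop := out = max_chain_alt pt
instance (pt : List (List Int)) (out : List (List (List Int))) : Decidable (Spec_max_chain pt out) := by unfold Spec_max_chain; infer_instance

-- ===== CLAIM (what is proved, stated in full; the proofs are below) =====
def Claim_equal_max_chain : Prop := ∀ (pt : List (List Int)), Dom_max_chain pt → Pre_max_chain pt → Spec_max_chain pt (max_chain pt)


-- ===== LEMMAS AND PROOFS =====

-- proof-side names for the loop bodies (definitionally the lambdas inside the ports)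
def pvStepA (i : List Int) (pc : List (List (List Int))) : List (List (List Int)) :=
  let r := pc.foldl
    (fun (st : List (List (List Int)) × Bool) j =>
      if pvCondA i j then (st.1 ++ [j ++ [i]], true) else (st.1 ++ [j], st.2))
    ([], false)
  if r.2 then r.1 else r.1 ++ [[i]]

def pvInnerB (i : List Int) (st : (List (List (List Int))) × PySem.Dict Int (PySem.Set Int))
    (c : Int) : (List (List (List Int))) × PySem.Dict Int (PySem.Set Int) :=
  let lastc := PySem.List.pyGetD (PySem.List.pyGetD st.1 c ([] : List (List Int))) (-1) ([] : List Int)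
  let x := PySem.List.pyGetD lastc 0 0
  let y := PySem.List.pyGetD lastc 1 0
  let bk := pvBDiscard (pvBDiscard st.2 x c) y c
  (PySem.List.pySetD st.1 c (PySem.List.pyGetD st.1 c ([] : List (List Int)) ++ [i]),
   pvBAdd (pvBAdd bk (PySem.List.pyGetD i 0 0) c) (PySem.List.pyGetD i 1 0) c)

def pvStepB (st : (List (List (List Int))) × PySem.Dict Int (PySem.Set Int)) (i : List Int) :
    (List (List (List Int))) × PySem.Dict Int (PySem.Set Int) :=
  let a := PySem.List.pyGetD i 0 0
  let b := PySem.List.pyGetD i 1 0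
  let hits := PySem.List.sorted
    (PySem.Set.union (st.2.getD a []) (st.2.getD b [])) (fun c => c) false
  if hits ≠ [] then
    hits.foldl (pvInnerB i) st
  else
    (st.1 ++ [[i]],
     pvBAdd (pvBAdd st.2 a (st.1.length : Int)) b (st.1.length : Int))

-- "qubit q occurs in gate l"
def pvTouch (q : Int) (l : List Int) : Prop :=
  q = PySem.List.pyGetD l 0 0 ∨ q = PySem.List.pyGetD l 1 0

-- last gate of chain n
def pvLastC (ch : List (List (List Int))) (n : Nat) : List Int :=
  PySem.List.pyGetD (ch.getD n []) (-1) ([] : List Int)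

-- bucket invariant: bk.getD q is exactly the (duplicate-free) set of chains whose last gate touches q
def pvInv (bk : PySem.Dict Int (PySem.Set Int)) (ch : List (List (List Int))) : Prop :=
  (∀ q : Int, (bk.getD q []).Nodup) ∧
  (∀ (q c : Int), c ∈ bk.getD q [] ↔ 0 ≤ c ∧ c.toNat < ch.length ∧ pvTouch q (pvLastC ch c.toNat))

lemma pvCondA_iff (i : List Int) (j : List (List Int)) :
    pvCondA i j = true ↔
      pvTouch (PySem.List.pyGetD i 0 0) (PySem.List.pyGetD j (-1) ([] : List Int)) ∨
      pvTouch (PySem.List.pyGetD i 1 0) (PySem.List.pyGetD j (-1) ([] : List Int)) := by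
  simp [pvCondA, pvTouch]
  tauto

def pvHits (i : List Int) (ch : List (List (List Int))) : List Int :=
  ((List.range ch.length).filter (fun n => pvCondA i (ch.getD n []))).map (fun n => Int.ofNat n)

lemma pvOfNat (n : Nat) : Int.ofNat n = (n : Int) := rfl

lemma mem_pvHits {i : List Int} {ch : List (List (List Int))} {c : Int} :
    c ∈ pvHits i ch ↔ 0 ≤ c ∧ c.toNat < ch.length ∧ pvCondA i (ch.getD c.toNat []) = true := by
  simp only [pvHits, List.mem_map, List.mem_filter, List.mem_range]
  constructor
  · rintro ⟨n, ⟨hn, hc⟩, rfl⟩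
    refine ⟨by rw [pvOfNat]; omega, by rw [pvOfNat, Int.toNat_natCast]; exact hn, ?_⟩
    rw [pvOfNat, Int.toNat_natCast]
    exact hc
  · rintro ⟨h0, hn, hc⟩
    exact ⟨c.toNat, ⟨hn, hc⟩, by rw [pvOfNat]; omega⟩

lemma nodup_pvHits (i : List Int) (ch : List (List (List Int))) : (pvHits i ch).Nodup := by
  refine List.Nodup.map (fun a b h => Int.ofNat.inj h) ?_
  exact List.Nodup.filter _ List.nodup_range

lemma pairwise_pvHits (i : List Int) (ch : List (List (List Int))) :
    (pvHits i ch).Pairwise (· < ·) := by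
  have hp : (List.filter (fun n => pvCondA i (ch.getD n [])) (List.range ch.length)).Pairwise (· < ·) :=
    List.Pairwise.filter _ List.pairwise_lt_range
  exact List.Pairwise.map _ (fun a b h => by rw [pvOfNat, pvOfNat]; exact_mod_cast h) hp

lemma sorted_union_eq (i : List Int) (ch : List (List (List Int)))
    (bk : PySem.Dict Int (PySem.Set Int)) (hInv : pvInv bk ch) :
    PySem.List.sorted
      (PySem.Set.union (bk.getD (PySem.List.pyGetD i 0 0) []) (bk.getD (PySem.List.pyGetD i 1 0) []))
      (fun c => c) false = pvHits i ch := by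
  apply PySem.List.sorted_eq_of_perm_of_pairwise_lt
  · rw [List.perm_ext_iff_of_nodup (nodup_pvHits i ch)
      (PySem.Set.nodup_union _ _ (hInv.1 _))]
    intro c
    rw [mem_pvHits, PySem.Set.mem_union, hInv.2, hInv.2]
    have hco : ∀ _ : c.toNat < ch.length, (pvCondA i (ch.getD c.toNat []) = true ↔
        pvTouch (PySem.List.pyGetD i 0 0) (pvLastC ch c.toNat) ∨
        pvTouch (PySem.List.pyGetD i 1 0) (pvLastC ch c.toNat)) := by
      intro _; rw [pvCondA_iff]; rfl
    constructor
    · rintro ⟨h0, hn, hc⟩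
      rcases (hco hn).1 hc with h | h
      · exact Or.inl ⟨h0, hn, h⟩
      · exact Or.inr ⟨h0, hn, h⟩
    · intro h
      rcases h with ⟨h0, hn, ht⟩ | ⟨h0, hn, ht⟩
      · exact ⟨h0, hn, (hco hn).2 (Or.inl ht)⟩
      · exact ⟨h0, hn, (hco hn).2 (Or.inr ht)⟩
  · exact pairwise_pvHits i ch

lemma foldlA (i : List Int) (pc : List (List (List Int))) :
    ∀ (acc : List (List (List Int))) (fl : Bool),
    pc.foldl (fun (st : List (List (List Int)) × Bool) j =>
        if pvCondA i j then (st.1 ++ [j ++ [i]], true) else (st.1 ++ [j], st.2)) (acc, fl)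
      = (acc ++ pc.map (fun j => if pvCondA i j then j ++ [i] else j),
         fl || pc.any (fun j => pvCondA i j)) := by
  induction pc with
  | nil => simp
  | cons j rest ih =>
    intro acc fl
    by_cases h : pvCondA i j <;> simp [h, ih]

lemma nodup_pvBAdd {bk : PySem.Dict Int (PySem.Set Int)} (h : ∀ q : Int, (bk.getD q []).Nodup)
    (k c : Int) : ∀ q : Int, ((pvBAdd bk k c).getD q []).Nodup := by
  intro q
  rw [pvBAdd, PySem.Dict.getD_modify]
  split_ifs
  · exact PySem.Set.nodup_add _ _ (h k)
  · exact h q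

lemma nodup_pvBDiscard {bk : PySem.Dict Int (PySem.Set Int)} (h : ∀ q : Int, (bk.getD q []).Nodup)
    (k c : Int) : ∀ q : Int, ((pvBDiscard bk k c).getD q []).Nodup := by
  intro q
  rw [pvBDiscard, PySem.Dict.getD_modify]
  split_ifs
  · exact PySem.Set.nodup_discard _ _ (h k)
  · exact h q

-- membership after the four bucket updates of an inner step, for an index other than c
set_option maxHeartbeats 1000000 in
lemma pvMem_upd_ne (bk : PySem.Dict Int (PySem.Set Int)) (x y a b c q c' : Int) (hc : c' ≠ c) :
    c' ∈ (pvBAdd (pvBAdd (pvBDiscard (pvBDiscard bk x c) y c) a c) b c).getD q [] ↔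
      c' ∈ bk.getD q [] := by
  simp only [pvBAdd, pvBDiscard, PySem.Dict.getD_modify]
  split_ifs <;>
    simp_all [PySem.Set.mem_add, PySem.Set.mem_discard]

-- membership after the four bucket updates of an inner step, for the index c itself
set_option maxHeartbeats 1000000 in
lemma pvMem_upd_self (bk : PySem.Dict Int (PySem.Set Int)) (x y a b c q : Int) :
    c ∈ (pvBAdd (pvBAdd (pvBDiscard (pvBDiscard bk x c) y c) a c) b c).getD q [] ↔
      (q = a ∨ q = b) ∨ (c ∈ bk.getD q [] ∧ ¬(q = x ∨ q = y)) := by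
  simp only [pvBAdd, pvBDiscard, PySem.Dict.getD_modify]
  split_ifs <;>
    simp_all [PySem.Set.mem_add, PySem.Set.mem_discard]

-- membership after the two bucket additions used for a fresh chain (and at initialisation)
set_option maxHeartbeats 1000000 in
lemma pvMem_add2 (bk : PySem.Dict Int (PySem.Set Int)) (a b L q c' : Int) :
    c' ∈ (pvBAdd (pvBAdd bk a L) b L).getD q [] ↔
      c' ∈ bk.getD q [] ∨ (c' = L ∧ (q = a ∨ q = b)) := by
  simp only [pvBAdd, PySem.Dict.getD_modify]
  split_ifs <;>
    simp_all [PySem.Set.mem_add]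

lemma pvLastC_set {ch : List (List (List Int))} {m : Nat} (v : List (List Int)) (n : Nat) :
    pvLastC (ch.set m v) n =
      if n = m ∧ m < ch.length then PySem.List.pyGetD v (-1) ([] : List Int) else pvLastC ch n := by
  unfold pvLastC
  rcases Nat.lt_or_ge n ch.length with hn | hn
  · rw [List.getD_eq_getElem _ _ (by simpa using hn), List.getElem_set,
        List.getD_eq_getElem _ _ hn]
    split_ifs with h1 h2 h2
    · rfl
    · omega
    · omega
    · rfl
  · rw [List.getD_eq_default _ _ (by simpa using hn), List.getD_eq_default _ _ hn]
    split_ifs with h1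
    · omega
    · rfl

lemma pvLastC_singleton (l : List Int) (rest : List (List Int)) :
    PySem.List.pyGetD (rest ++ [l]) (-1) ([] : List Int) = l :=
  PySem.List.pyGetD_neg_one_append_singleton rest l []

-- one inner-loop step preserves the bucket invariant
lemma pvInv_step {bk : PySem.Dict Int (PySem.Set Int)} {ch : List (List (List Int))}
    (i : List Int) (c : Int) (hInv : pvInv bk ch) (h0 : 0 ≤ c) (hlt : c.toNat < ch.length) :
    pvInv
      (pvBAdd (pvBAdd (pvBDiscard (pvBDiscard bk (PySem.List.pyGetD (pvLastC ch c.toNat) 0 0) c)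
          (PySem.List.pyGetD (pvLastC ch c.toNat) 1 0) c)
        (PySem.List.pyGetD i 0 0) c) (PySem.List.pyGetD i 1 0) c)
      (ch.set c.toNat (ch.getD c.toNat [] ++ [i])) := by
  have hlast : ∀ n : Nat, pvLastC (ch.set c.toNat (ch.getD c.toNat [] ++ [i])) n =
      if n = c.toNat then i else pvLastC ch n := by
    intro n
    rw [pvLastC_set]
    split_ifs with h1 h2 h2
    · exact pvLastC_singleton i _
    · omega
    · omega
    · rfl
  refine ⟨nodup_pvBAdd (nodup_pvBAdd (nodup_pvBDiscard (nodup_pvBDiscard hInv.1 _ _) _ _) _ _) _ _, ?_⟩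
  intro q c'
  by_cases hc : c' = c
  · subst hc
    rw [pvMem_upd_self]
    constructor
    · rintro (hab | ⟨hmem, hxy⟩)
      · refine ⟨h0, by simpa [List.length_set] using hlt, ?_⟩
        rw [hlast, if_pos rfl]
        exact hab
      · exact absurd ((hInv.2 q c').1 hmem).2.2 hxy
    · rintro ⟨-, -, ht⟩
      rw [hlast, if_pos rfl] at ht
      exact Or.inl ht
  · rw [pvMem_upd_ne _ _ _ _ _ _ _ _ hc, hInv.2]
    by_cases h0' : 0 ≤ c'
    · have hne : c'.toNat ≠ c.toNat := by omega
      rw [hlast, if_neg hne, List.length_set]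
    · constructor <;> (rintro ⟨h, -, -⟩; exact absurd h h0')

-- appending a fresh one-gate chain preserves the bucket invariant
lemma pvInv_append {bk : PySem.Dict Int (PySem.Set Int)} {ch : List (List (List Int))}
    (i : List Int) (hInv : pvInv bk ch) :
    pvInv (pvBAdd (pvBAdd bk (PySem.List.pyGetD i 0 0) (ch.length : Int))
             (PySem.List.pyGetD i 1 0) (ch.length : Int))
          (ch ++ [[i]]) := by
  refine ⟨nodup_pvBAdd (nodup_pvBAdd hInv.1 _ _) _ _, ?_⟩
  intro q c'
  rw [pvMem_add2, hInv.2]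
  have hlastold : ∀ n : Nat, n < ch.length → pvLastC (ch ++ [[i]]) n = pvLastC ch n := by
    intro n hn
    unfold pvLastC
    rw [List.getD_append _ _ _ _ hn]
  have hlastnew : pvLastC (ch ++ [[i]]) ch.length = i := by
    unfold pvLastC
    rw [List.getD_eq_getElem _ _ (by simp), List.getElem_append_right (le_refl _)]
    simpa using pvLastC_singleton i []
  constructor
  · rintro (⟨hn0, hn, ht⟩ | ⟨rfl, hab⟩)
    · refine ⟨hn0, by simp; omega, ?_⟩
      rw [hlastold _ hn]
      exact ht
    · refine ⟨by positivity, by simp, ?_⟩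
      simpa [hlastnew] using hab
  · rintro ⟨h0, hn, ht⟩
    by_cases hl : c'.toNat = ch.length
    · right
      refine ⟨by omega, ?_⟩
      rw [hl, hlastnew] at ht
      exact ht
    · left
      have hlt : c'.toNat < ch.length := by simp at hn; omega
      rw [hlastold _ hlt] at ht
      exact ⟨h0, hlt, ht⟩

-- the invariant holds for the initial state built from the first gate
lemma pvInv_init (first : List Int) :
    pvInv (pvBAdd (pvBAdd PySem.Dict.empty (PySem.List.pyGetD first 0 0) 0)
             (PySem.List.pyGetD first 1 0) 0)
          [[first]] := by
  have hbase : ∀ q : Int, ((PySem.Dict.empty : PySem.Dict Int (PySem.Set Int)).getD q []).Nodup := by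
    intro q
    simp [PySem.Dict.getD_empty]
  refine ⟨nodup_pvBAdd (nodup_pvBAdd hbase _ _) _ _, ?_⟩
  intro q c'
  rw [pvMem_add2]
  have hlast : pvLastC [[first]] 0 = first := by
    unfold pvLastC
    simpa using pvLastC_singleton first []
  simp only [PySem.Dict.getD_empty]
  constructor
  · rintro (h | ⟨rfl, hab⟩)
    · simp at h
    · refine ⟨le_refl _, by simp, ?_⟩
      simpa [hlast] using hab
  · rintro ⟨h0, hn, ht⟩
    right
    have : c' = 0 := by simp at hn; omega
    subst this
    simp only [Int.toNat_zero, hlast] at ht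
    exact ⟨rfl, ht⟩

-- the inner loop over a duplicate-free list of in-range indices appends i to exactly
-- those chains, and preserves the invariant
lemma foldB_inner (i : List Int) (S : List Int) :
    ∀ (ch : List (List (List Int))) (bk : PySem.Dict Int (PySem.Set Int)),
      pvInv bk ch → S.Nodup → (∀ c ∈ S, 0 ≤ c ∧ c.toNat < ch.length) →
      (S.foldl (pvInnerB i) (ch, bk)).1
          = ch.mapIdx (fun n j => if Int.ofNat n ∈ S then j ++ [i] else j)
        ∧ pvInv (S.foldl (pvInnerB i) (ch, bk)).2 (S.foldl (pvInnerB i) (ch, bk)).1 := by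
  induction S with
  | nil =>
    intro ch bk hInv _ _
    refine ⟨?_, by simpa using hInv⟩
    apply List.ext_getElem (by simp)
    intro n h1 h2
    simp [List.getElem_mapIdx]
  | cons c S' ih =>
    intro ch bk hInv hnd hrange
    obtain ⟨h0, hlt⟩ := hrange c List.mem_cons_self
    have hch : (pvInnerB i (ch, bk) c).1 = ch.set c.toNat (ch.getD c.toNat [] ++ [i]) := by
      simp only [pvInnerB]
      rw [PySem.List.pySetD_of_nonneg _ _ h0,
          PySem.List.pyGetD_eq_getElem _ _ h0 (by omega),
          List.getD_eq_getElem _ _ hlt]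
    have hbk : (pvInnerB i (ch, bk) c).2 =
        pvBAdd (pvBAdd (pvBDiscard (pvBDiscard bk (PySem.List.pyGetD (pvLastC ch c.toNat) 0 0) c)
            (PySem.List.pyGetD (pvLastC ch c.toNat) 1 0) c)
          (PySem.List.pyGetD i 0 0) c) (PySem.List.pyGetD i 1 0) c := by
      simp only [pvInnerB, pvLastC]
      rw [PySem.List.pyGetD_eq_getElem _ _ h0 (by omega), List.getD_eq_getElem _ _ hlt]
    have hInv1 : pvInv (pvInnerB i (ch, bk) c).2 (pvInnerB i (ch, bk) c).1 := by
      rw [hch, hbk]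
      exact pvInv_step i c hInv h0 hlt
    have hlen1 : (pvInnerB i (ch, bk) c).1.length = ch.length := by
      rw [hch]; exact List.length_set ..
    have hnd' := (List.nodup_cons.1 hnd)
    have hrec := ih (pvInnerB i (ch, bk) c).1 (pvInnerB i (ch, bk) c).2 hInv1 hnd'.2
      (fun c' hc' => by
        obtain ⟨a1, a2⟩ := hrange c' (List.mem_cons_of_mem _ hc')
        exact ⟨a1, by omega⟩)
    rw [Prod.mk.eta] at hrec
    have hfold : (List.foldl (pvInnerB i) (ch, bk) (c :: S')) =
        (List.foldl (pvInnerB i) (pvInnerB i (ch, bk) c) S') := by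
      simp [List.foldl_cons]
    refine ⟨?_, by rw [hfold]; exact hrec.2⟩
    rw [hfold, hrec.1]
    refine List.ext_getElem (by simp [hlen1]) ?_
    intro n h1 h2
    have hn1 : n < (pvInnerB i (ch, bk) c).1.length := by simpa using h1
    have hlen2 : n < ch.length := by rw [hlen1] at hn1; exact hn1
    rw [List.getElem_mapIdx, List.getElem_mapIdx]
    have hgch : (pvInnerB i (ch, bk) c).1[n]'hn1 =
        if c.toNat = n then ch[c.toNat]'hlt ++ [i] else ch[n]'hlen2 := by
      have := hch
      rw [List.getD_eq_getElem _ _ hlt] at this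
      simp [this, List.getElem_set]
    rw [hgch]
    by_cases hn : (n : Int) = c
    · have hnc : c.toNat = n := by omega
      have hnotin : (n : Int) ∉ S' := by rw [hn]; exact hnd'.1
      simp [hn, hnc, List.mem_cons, hnd'.1]
    · have hnc : ¬ c.toNat = n := by omega
      simp [hnc, List.mem_cons, hn]

-- one outer-loop step: B's chains equal A's, and the invariant is preserved
lemma stepAB (i : List Int) (ch : List (List (List Int))) (bk : PySem.Dict Int (PySem.Set Int))
    (hInv : pvInv bk ch) :
    (pvStepB (ch, bk) i).1 = pvStepA i ch ∧ pvInv (pvStepB (ch, bk) i).2 (pvStepB (ch, bk) i).1 := by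
  have hsort := sorted_union_eq i ch bk hInv
  have hstepB : pvStepB (ch, bk) i =
      (if pvHits i ch ≠ [] then (pvHits i ch).foldl (pvInnerB i) (ch, bk)
       else (ch ++ [[i]],
         pvBAdd (pvBAdd bk (PySem.List.pyGetD i 0 0) (ch.length : Int))
           (PySem.List.pyGetD i 1 0) (ch.length : Int))) := by
    simp only [pvStepB, hsort]
  have hA : pvStepA i ch =
      (if ch.any (fun j => pvCondA i j)
       then ch.map (fun j => if pvCondA i j then j ++ [i] else j)
       else ch.map (fun j => if pvCondA i j then j ++ [i] else j) ++ [[i]]) := by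
    simp only [pvStepA, foldlA i ch [] false, List.nil_append, Bool.false_or]
  have hany : ch.any (fun j => pvCondA i j) = true ↔ pvHits i ch ≠ [] := by
    constructor
    · intro h
      obtain ⟨j, hj, hcj⟩ := List.any_eq_true.1 h
      obtain ⟨n, hn, rfl⟩ := List.mem_iff_getElem.1 hj
      intro hemp
      have : Int.ofNat n ∈ pvHits i ch := by
        rw [mem_pvHits]
        refine ⟨Int.natCast_nonneg n, ?_, ?_⟩ <;>
          rw [show (Int.ofNat n).toNat = n from rfl]
        · exact hn
        · rw [List.getD_eq_getElem _ _ hn]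
          exact hcj
      simp [hemp] at this
    · intro h
      obtain ⟨c, hc⟩ := List.exists_mem_of_ne_nil _ h
      obtain ⟨hc0, hcn, hcc⟩ := mem_pvHits.1 hc
      refine List.any_eq_true.2 ⟨ch[c.toNat]'hcn, List.getElem_mem hcn, ?_⟩
      rwa [List.getD_eq_getElem _ _ hcn] at hcc
  by_cases hh : pvHits i ch = []
  · have hanyf : ch.any (fun j => pvCondA i j) = false := by
      rw [Bool.eq_false_iff]
      intro hcon
      exact (hany.1 hcon) hh
    have hmap : ch.map (fun j => if pvCondA i j then j ++ [i] else j) = ch := by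
      have : ∀ j ∈ ch, (if pvCondA i j then j ++ [i] else j) = j := by
        intro j hj
        have : pvCondA i j = false := by
          have := List.any_eq_false.1 hanyf j hj
          simpa using this
        simp [this]
      simpa using List.map_congr_left this
    rw [hstepB, if_neg (by simpa using hh), hA, hanyf]
    simp only [Bool.false_eq_true, if_false, hmap]
    exact ⟨by simp, pvInv_append i hInv⟩
  · have hfold := foldB_inner i (pvHits i ch) ch bk hInv (nodup_pvHits i ch)
      (fun c hc => ⟨(mem_pvHits.1 hc).1, (mem_pvHits.1 hc).2.1⟩)
    have hmapIdx : ch.mapIdx (fun n j => if Int.ofNat n ∈ pvHits i ch then j ++ [i] else j)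
        = ch.map (fun j => if pvCondA i j then j ++ [i] else j) := by
      apply List.ext_getElem (by simp)
      intro n h1 h2
      rw [List.getElem_mapIdx, List.getElem_map]
      have hn : n < ch.length := by simpa using h1
      have : Int.ofNat n ∈ pvHits i ch ↔ pvCondA i ch[n] = true := by
        rw [mem_pvHits, show (Int.ofNat n).toNat = n from rfl]
        constructor
        · rintro ⟨-, hlt', hc⟩
          rwa [List.getD_eq_getElem _ _ (by simpa using hlt')] at hc
        · intro hc
          exact ⟨Int.natCast_nonneg n, hn, by rwa [List.getD_eq_getElem _ _ hn]⟩
      by_cases hmem : Int.ofNat n ∈ pvHits i ch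
      · have hmem' : ((n : Nat) : Int) ∈ pvHits i ch := pvOfNat n ▸ hmem
        simp [hmem', this.1 hmem]
      · have hcond : ¬ pvCondA i ch[n] = true := fun hcon => hmem (this.2 hcon)
        have hmem' : ¬ ((n : Nat) : Int) ∈ pvHits i ch := by rw [← pvOfNat]; exact hmem
        simp [hmem', hcond]
    rw [hstepB, if_pos (by simpa using hh), hA, hany.2 hh]
    simp only [if_true]
    exact ⟨by rw [hfold.1, hmapIdx], hfold.2⟩

-- main loop: given the invariant, A's fold and B's fold produce the same chain list
lemma mainAB (pt : List (List Int)) :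
    ∀ (ch : List (List (List Int))) (bk : PySem.Dict Int (PySem.Set Int)), pvInv bk ch →
      pt.foldl (fun pc i => pvStepA i pc) ch = (pt.foldl pvStepB (ch, bk)).1 := by
  induction pt with
  | nil => intro ch bk _; rfl
  | cons i rest ih =>
    intro ch bk hInv
    obtain ⟨h1, h2⟩ := stepAB i ch bk hInv
    simp only [List.foldl_cons]
    rw [← h1]
    have := ih (pvStepB (ch, bk) i).1 (pvStepB (ch, bk) i).2 h2
    simpa [Prod.mk.eta] using this

-- ===== VERDICT (by name: the statement is the Claim_ definition above) =====
theorem max_chain_spec : Claim_equal_max_chain := by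
  intro pt _hD _hP
  unfold Spec_max_chain max_chain max_chain_alt
  exact mainAB pt _ _ (pvInv_init _)
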